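-- pv_equiv track=rewrite | github.com/theminer3746/2110101_Com_Prog | Function/Function_P7.py | f
-- ===== SOURCE A (Python) =====
-- def f(x):
--     k = 0
--     for i in range(1,2*x,2):
--         k += i
--     for j in range(k):
--         if j%x==0:
--             k += 2
--     return k+3
-- ===== SOURCE B (Python) =====
-- def f(x):
--     return x * x + 2 * x + 3 if x >= 1 else 3
-- ===== Notes on version B (the rewrite author's own statement) =====
-- stated objective: faster
-- what changed: Replaced the two loops (summing odds to x^2, then scanning range(x^2) counting multiples of x) by the closed form x*x+2*x+3 for x>=1 and 3 otherwise.
import Mathlib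
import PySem

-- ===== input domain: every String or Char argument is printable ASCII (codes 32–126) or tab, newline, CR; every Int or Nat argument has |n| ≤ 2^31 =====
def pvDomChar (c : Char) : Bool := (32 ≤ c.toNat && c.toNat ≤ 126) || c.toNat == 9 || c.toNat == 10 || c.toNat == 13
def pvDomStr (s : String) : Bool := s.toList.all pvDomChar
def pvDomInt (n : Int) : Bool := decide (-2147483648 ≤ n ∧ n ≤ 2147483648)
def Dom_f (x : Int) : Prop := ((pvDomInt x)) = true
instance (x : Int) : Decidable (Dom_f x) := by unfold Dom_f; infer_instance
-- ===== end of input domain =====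

-- B replaces A's two loops by the closed form x*x+2*x+3 for x ≥ 1 (else 3); O(1) instead of O(x^2).

-- ===== PORT A =====
def f (x : Int) : Int :=
  let k : Int := (PySem.List.pyRange 1 (2 * x) 2).foldl (fun k i => k + i) 0
  let k : Int :=
    (PySem.List.pyRange 0 k 1).foldl
      (fun k j => if PySem.Int.mod j x == 0 then k + 2 else k) k
  k + 3

-- ===== PORT B =====
def f_alt (x : Int) : Int := if x ≥ 1 then x * x + 2 * x + 3 else 3

-- ===== PRECONDITION & SPEC =====
def Spec_f (x : Int) (out : Int) : Prop := out = f_alt x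
instance (x : Int) (out : Int) : Decidable (Spec_f x out) := by unfold Spec_f; infer_instance

-- ===== CLAIM (what is proved, stated in full; the proofs are below) =====
def Claim_equal_f : Prop := ∀ (x : Int), Dom_f x → Spec_f x (f x)

-- ===== LEMMAS AND PROOFS =====

-- sum of the first n odd numbers is n^2
theorem pv_sum_odds (n : Nat) :
    ((List.range n).map (fun (k : Nat) => (1 : Int) + 2 * (k : Int))).sum = (n : Int) * n := by
  induction n with
  | zero => simp
  | succ m ih =>
    rw [List.range_succ, List.map_append, List.sum_append, ih]
    push_cast
    simp
    ring

-- first loop of A computes x*x for x ≥ 1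
theorem pv_loop1 (x : Int) (hx : 1 ≤ x) :
    (PySem.List.pyRange 1 (2 * x) 2).foldl (fun k i => k + i) 0 = x * x := by
  rw [PySem.List.pyRange_of_pos 1 (2 * x) (by norm_num)]
  have hlt : (1 : Int) < 2 * x := by omega
  rw [if_pos hlt]
  have h2 : ((2 * x - 1 + 2 - 1) / 2).toNat = x.toNat := by omega
  rw [h2, PySem.List.foldl_add]
  simp only [List.map_id']
  have hx' : ((x.toNat : Int)) = x := by omega
  rw [pv_sum_odds x.toNat, hx']
  ring

-- number of multiples of x in [0, m*x) is m (x > 0)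
theorem pv_count (x : Int) (hx : 0 < x) (m : Nat) :
    ((PySem.List.pyRange 0 ((m : Int) * x) 1).filter
      (fun j => PySem.Int.mod j x == 0)).length = m := by
  induction m with
  | zero => simp [PySem.List.pyRange_one_eq_nil]
  | succ m ih =>
    have h1 : (0 : Int) ≤ (m : Int) * x := by positivity
    have h2 : (m : Int) * x ≤ ((m : Nat) + 1 : Int) * x := by nlinarith
    rw [show (((m + 1 : Nat) : Int)) = ((m : Int) + 1) by push_cast; ring]
    rw [PySem.List.pyRange_one_append 0 ((m : Int) * x) (((m : Int) + 1) * x) h1 (by nlinarith),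
        List.filter_append, List.length_append, ih]
    have hcons : PySem.List.pyRange ((m : Int) * x) (((m : Int) + 1) * x) =
        ((m : Int) * x) :: PySem.List.pyRange ((m : Int) * x + 1) (((m : Int) + 1) * x) :=
      PySem.List.pyRange_one_cons (by nlinarith)
    rw [hcons]
    have hdvd : PySem.Int.mod ((m : Int) * x) x = 0 :=
      (PySem.Int.mod_eq_zero_iff_dvd _ _).mpr ⟨m, by ring⟩
    rw [List.filter_cons_of_pos (by simp [hdvd])]
    have hnil : (PySem.List.pyRange ((m : Int) * x + 1) (((m : Int) + 1) * x)).filter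
        (fun j => PySem.Int.mod j x == 0) = [] := by
      rw [List.filter_eq_nil_iff]
      intro j hj
      rw [PySem.List.mem_pyRange_one] at hj
      simp only [beq_iff_eq]
      rw [PySem.Int.mod_eq_zero_iff_dvd]
      rintro ⟨c, rfl⟩
      have hcl : (m : Int) < c := by nlinarith
      have hcu : c < (m : Int) + 1 := by nlinarith
      omega
    rw [hnil]
    simp

-- second loop of A adds 2*x starting from k0 = x*x (x ≥ 1)
theorem pv_loop2 (x : Int) (hx : 1 ≤ x) (k0 : Int) (hk : k0 = x * x) :
    (PySem.List.pyRange 0 k0 1).foldl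
      (fun k j => if PySem.Int.mod j x == 0 then k + 2 else k) k0 = k0 + 2 * x := by
  rw [PySem.List.foldl_if_eq_foldl_filter (fun j => PySem.Int.mod j x == 0) (fun acc _ => acc + 2)]
  rw [PySem.List.foldl_add _ (fun _ => (2 : Int)), PySem.List.sum_map_const_int]
  have hx0 : 0 < x := by omega
  have hx' : ((x.toNat : Nat) : Int) = x := by omega
  have hxx : k0 = ((x.toNat : Nat) : Int) * x := by rw [hx', hk]
  rw [hxx, pv_count x hx0 x.toNat]
  omega

-- ===== VERDICT (by name: the statement is the Claim_ definition above) =====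
theorem f_spec : Claim_equal_f := by
  intro x _
  unfold Spec_f f f_alt
  by_cases hx : 1 ≤ x
  · rw [if_pos hx]
    simp only []
    rw [pv_loop1 x hx, pv_loop2 x hx (x * x) rfl]
  · rw [if_neg hx]
    have h1 : PySem.List.pyRange 1 (2 * x) 2 = [] := by
      rw [PySem.List.pyRange_of_pos 1 (2 * x) (by norm_num), if_neg (by omega)]
      simp
    rw [h1]
    simp [PySem.List.pyRange_one_eq_nil]
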